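-- pv_equiv track=rewrite | github.com/YEONGINJOO/algorithm | 백준/Silver/8933. MCS/MCS.py | find_k_mcs
-- ===== SOURCE A (Python) =====
-- from collections import defaultdict
--
-- def count_chars(s):
--     count = [0] * 4
--     for char in s:
--         if char == 'A':
--             count[0] += 1
--         elif char == 'C':
--             count[1] += 1
--         elif char == 'G':
--             count[2] += 1
--         elif char == 'T':
--             count[3] += 1
--     return tuple(count)
--
-- def find_k_mcs(k, w):
--     n = len(w)
--     freq = defaultdict(int)
--
--     # 초기 윈도우 설정
--     current_window = w[:k]
--     current_count = count_chars(current_window)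
--     freq[current_count] += 1
--
--     # 슬라이딩 윈도우
--     for i in range(1, n - k + 1):
--         # 이전 윈도우의 첫 문자 제거
--         if w[i-1] == 'A':
--             current_count = (current_count[0] - 1, current_count[1], current_count[2], current_count[3])
--         elif w[i-1] == 'C':
--             current_count = (current_count[0], current_count[1] - 1, current_count[2], current_count[3])
--         elif w[i-1] == 'G':
--             current_count = (current_count[0], current_count[1], current_count[2] - 1, current_count[3])
--         elif w[i-1] == 'T':
--             current_count = (current_count[0], current_count[1], current_count[2], current_count[3] - 1)
--
--         # 새로운 윈도우의 마지막 문자 추가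
--         if w[i + k - 1] == 'A':
--             current_count = (current_count[0] + 1, current_count[1], current_count[2], current_count[3])
--         elif w[i + k - 1] == 'C':
--             current_count = (current_count[0], current_count[1] + 1, current_count[2], current_count[3])
--         elif w[i + k - 1] == 'G':
--             current_count = (current_count[0], current_count[1], current_count[2] + 1, current_count[3])
--         elif w[i + k - 1] == 'T':
--             current_count = (current_count[0], current_count[1], current_count[2], current_count[3] + 1)
--
--         freq[current_count] += 1
--
--     return max(freq.values())
-- ===== SOURCE B (Python) =====
-- from collections import Counter
--
-- def find_k_mcs(k, w):
--     n = len(w)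
--     freq = Counter(
--         (s.count('A'), s.count('C'), s.count('G'), s.count('T'))
--         for s in (w[i:i + k] for i in range(max(1, n - k + 1))))
--     return max(freq.values())
-- ===== Notes on version B (the rewrite author's own statement) =====
-- stated objective: simpler
-- what changed: A's stateful sliding-window update (incremental 4-tuple maintained across iterations, with two 4-branch if-chains per step) is replaced by recomputing every window w[i:i+k] from scratch and feeding the per-window (countA,countC,countG,countT) tuples into one Counter whose max value is returned.
import Mathlib
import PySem

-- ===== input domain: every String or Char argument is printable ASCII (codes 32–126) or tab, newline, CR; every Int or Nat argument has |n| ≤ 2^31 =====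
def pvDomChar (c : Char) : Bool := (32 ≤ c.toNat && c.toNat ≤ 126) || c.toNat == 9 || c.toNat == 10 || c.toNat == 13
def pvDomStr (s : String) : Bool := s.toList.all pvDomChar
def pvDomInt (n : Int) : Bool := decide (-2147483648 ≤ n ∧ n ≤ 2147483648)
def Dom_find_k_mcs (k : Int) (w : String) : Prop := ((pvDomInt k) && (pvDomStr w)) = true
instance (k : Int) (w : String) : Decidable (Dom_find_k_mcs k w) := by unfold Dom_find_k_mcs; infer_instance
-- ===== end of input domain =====

-- B replaces A's stateful sliding-window count update by recomputing each window's
-- (A,C,G,T) composition from scratch and feeding all of them to one Counter: simpler, not faster.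

-- ===== PORT A =====
-- count_chars: the 4-branch tally loop, as a foldl over the same 4-tuple state
def count_chars (s : List Char) : Int × Int × Int × Int :=
  s.foldl (fun c ch =>
    if ch = 'A' then (c.1 + 1, c.2.1, c.2.2.1, c.2.2.2)
    else if ch = 'C' then (c.1, c.2.1 + 1, c.2.2.1, c.2.2.2)
    else if ch = 'G' then (c.1, c.2.1, c.2.2.1 + 1, c.2.2.2)
    else if ch = 'T' then (c.1, c.2.1, c.2.2.1, c.2.2.2 + 1)
    else c) (0, 0, 0, 0)

-- the first if-chain of A's loop body: remove the window's departing character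
def decChar (ch : Char) (c : Int × Int × Int × Int) : Int × Int × Int × Int :=
  if ch = 'A' then (c.1 - 1, c.2.1, c.2.2.1, c.2.2.2)
  else if ch = 'C' then (c.1, c.2.1 - 1, c.2.2.1, c.2.2.2)
  else if ch = 'G' then (c.1, c.2.1, c.2.2.1 - 1, c.2.2.2)
  else if ch = 'T' then (c.1, c.2.1, c.2.2.1, c.2.2.2 - 1)
  else c

-- the second if-chain of A's loop body: add the window's entering character
def incChar (ch : Char) (c : Int × Int × Int × Int) : Int × Int × Int × Int :=
  if ch = 'A' then (c.1 + 1, c.2.1, c.2.2.1, c.2.2.2)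
  else if ch = 'C' then (c.1, c.2.1 + 1, c.2.2.1, c.2.2.2)
  else if ch = 'G' then (c.1, c.2.1, c.2.2.1 + 1, c.2.2.2)
  else if ch = 'T' then (c.1, c.2.1, c.2.2.1, c.2.2.2 + 1)
  else c

-- current_count after one loop iteration (indices in range under Pre_, so pyGetD's default is never read)
def updA (cs : List Char) (k : Int) (cc : Int × Int × Int × Int) (i : Int) : Int × Int × Int × Int :=
  incChar (PySem.List.pyGetD cs (i + k - 1) ' ') (decChar (PySem.List.pyGetD cs (i - 1) ' ') cc)

def find_k_mcs (k : Int) (w : String) : Int :=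
  let cs := w.toList
  let n : Int := PySem.List.len cs
  let currentCount := count_chars (PySem.List.slice cs none (some k))                 -- count_chars(w[:k])
  let freq0 : PySem.Dict (Int × Int × Int × Int) Int :=
    (PySem.Dict.empty).modify currentCount 0 (· + 1)                                   -- defaultdict: freq[c] += 1
  let res := (PySem.List.pyRange 1 (n - k + 1) 1).foldl
    (fun (st : PySem.Dict (Int × Int × Int × Int) Int × (Int × Int × Int × Int)) i =>
      let cc := updA cs k st.2 i
      (st.1.modify cc 0 (· + 1), cc))
    (freq0, currentCount)
  ((PySem.List.max? res.1.values (fun v => v)).getD 0)                                 -- max(freq.values()); freq is never empty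

-- ===== PORT B =====
-- s.count(c) for the single characters 'A','C','G','T' is List.count
def count4 (s : List Char) : Int × Int × Int × Int :=
  ((s.count 'A' : Int), (s.count 'C' : Int), (s.count 'G' : Int), (s.count 'T' : Int))

def find_k_mcs_alt (k : Int) (w : String) : Int :=
  let cs := w.toList
  let n : Int := PySem.List.len cs
  let freq := PySem.Dict.counter ((PySem.List.pyRange 0 (max 1 (n - k + 1)) 1).map
    (fun i => count4 (PySem.List.slice cs (some i) (some (i + k)))))                   -- Counter of the tuple of each w[i:i+k], i in range(max(1, n-k+1))
  ((PySem.List.max? freq.values (fun v => v)).getD 0)                                  -- max(freq.values()); freq is never empty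

-- ===== PRECONDITION & SPEC =====
-- Pre_ excludes only k < 0: there A's sliding loop runs past the end of w (i ranges up to n-k > n)
-- and always raises IndexError on w[i-1]; A never returns a value for k < 0.
def Pre_find_k_mcs (k : Int) (w : String) : Prop := 0 ≤ k
instance (k : Int) (w : String) : Decidable (Pre_find_k_mcs k w) := by unfold Pre_find_k_mcs; infer_instance
def pvWitness_find_k_mcs : Int × String := (2, "ACGTA")

def Spec_find_k_mcs (k : Int) (w : String) (out : Int) : Prop := out = find_k_mcs_alt k w
instance (k : Int) (w : String) (out : Int) : Decidable (Spec_find_k_mcs k w out) := by unfold Spec_find_k_mcs; infer_instance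

-- ===== CLAIM (what is proved, stated in full; the proofs are below) =====
def Claim_equal_find_k_mcs : Prop := ∀ (k : Int) (w : String), Dom_find_k_mcs k w → Pre_find_k_mcs k w → Spec_find_k_mcs k w (find_k_mcs k w)

-- ===== LEMMAS AND PROOFS =====

-- A's window at start j (length kn), as a plain list
def wnd (cs : List Char) (kn j : Nat) : List Char := (cs.drop j).take kn

-- count_chars tallies exactly the four character counts
theorem count_chars_eq (s : List Char) : count_chars s = count4 s := by
  have aux : ∀ (s : List Char) (q : Int × Int × Int × Int),
      s.foldl (fun c ch =>
        if ch = 'A' then (c.1 + 1, c.2.1, c.2.2.1, c.2.2.2)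
        else if ch = 'C' then (c.1, c.2.1 + 1, c.2.2.1, c.2.2.2)
        else if ch = 'G' then (c.1, c.2.1, c.2.2.1 + 1, c.2.2.2)
        else if ch = 'T' then (c.1, c.2.1, c.2.2.1, c.2.2.2 + 1)
        else c) q
      = (q.1 + (s.count 'A' : Int), q.2.1 + (s.count 'C' : Int),
         q.2.2.1 + (s.count 'G' : Int), q.2.2.2 + (s.count 'T' : Int)) := by
    intro s
    induction s with
    | nil => intro q; simp
    | cons h t ih =>
      intro q
      simp only [List.foldl_cons]
      rw [ih]
      split_ifs with hA hC hG hT <;>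
        first
          | (subst_vars; simp [List.count_cons]; ring_nf)
          | (simp [hA, hC, hG, hT])
  rw [count_chars, aux, count4]
  simp

-- decChar subtracts the indicator of each of the four characters
theorem decChar_eq (ch : Char) (c : Int × Int × Int × Int) :
    decChar ch c = (c.1 - (if ch = 'A' then 1 else 0), c.2.1 - (if ch = 'C' then 1 else 0),
      c.2.2.1 - (if ch = 'G' then 1 else 0), c.2.2.2 - (if ch = 'T' then 1 else 0)) := by
  by_cases hA : ch = 'A'
  · subst hA; simp [decChar]
  · by_cases hC : ch = 'C'
    · subst hC; simp [decChar]
    · by_cases hG : ch = 'G'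
      · subst hG; simp [decChar]
      · by_cases hT : ch = 'T'
        · subst hT; simp [decChar]
        · simp [decChar, hA, hC, hG, hT]

theorem incChar_eq (ch : Char) (c : Int × Int × Int × Int) :
    incChar ch c = (c.1 + (if ch = 'A' then 1 else 0), c.2.1 + (if ch = 'C' then 1 else 0),
      c.2.2.1 + (if ch = 'G' then 1 else 0), c.2.2.2 + (if ch = 'T' then 1 else 0)) := by
  by_cases hA : ch = 'A'
  · subst hA; simp [incChar]
  · by_cases hC : ch = 'C'
    · subst hC; simp [incChar]
    · by_cases hG : ch = 'G'
      · subst hG; simp [incChar]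
      · by_cases hT : ch = 'T'
        · subst hT; simp [incChar]
        · simp [incChar, hA, hC, hG, hT]

-- sliding one step changes each character count by the departing/entering indicators
theorem wnd_count_slide (cs : List Char) (kn j : Nat) (c : Char) (h : j + kn < cs.length) :
    ((wnd cs kn (j + 1)).count c : Int)
      = ((wnd cs kn j).count c : Int) - (if cs[j]'(by omega) = c then 1 else 0)
        + (if cs[j + kn]'h = c then 1 else 0) := by
  cases kn with
  | zero => simp [wnd]
  | succ m =>
    have h1 : j < cs.length := by omega
    have e1 : wnd cs (m + 1) j = cs[j] :: wnd cs m (j + 1) := by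
      rw [wnd, List.drop_eq_getElem_cons h1, List.take_succ_cons, wnd]
    have hlen : m < (cs.drop (j + 1)).length := by
      rw [List.length_drop]; omega
    have e2 : wnd cs (m + 1) (j + 1) = wnd cs m (j + 1) ++ [cs[j + (m + 1)]'h] := by
      rw [wnd, List.take_add_one, wnd]
      congr 1
      rw [List.getElem?_eq_getElem hlen]
      simp [List.getElem_drop]
      congr 1
      omega
    rw [e1, e2]
    simp only [List.count_cons, List.count_append]
    by_cases hc1 : cs[j] = c <;> by_cases hc2 : cs[j + (m+1)]'h = c <;>
      simp [hc1, hc2, beq_iff_eq]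

-- A's loop body sends the composition of window i-1 to the composition of window i
theorem updA_slide (cs : List Char) (k i : Int) (hk : 0 ≤ k) (h1 : 1 ≤ i)
    (h2 : i ≤ (cs.length : Int) - k) :
    updA cs k (count4 (wnd cs k.toNat (i - 1).toNat)) i = count4 (wnd cs k.toNat i.toNat) := by
  have hj1 : (0:Int) ≤ i - 1 := by omega
  have hj2 : i - 1 < (cs.length : Int) := by omega
  have hi1 : (0:Int) ≤ i + k - 1 := by omega
  have hi2 : i + k - 1 < (cs.length : Int) := by omega
  have hidx : (i + k - 1).toNat = (i - 1).toNat + k.toNat := by omega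
  have hrange : (i - 1).toNat + k.toNat < cs.length := by omega
  have hitn : i.toNat = (i - 1).toNat + 1 := by omega
  rw [updA, PySem.List.pyGetD_eq_getElem cs ' ' hj1 hj2, PySem.List.pyGetD_eq_getElem cs ' ' hi1 hi2,
    decChar_eq, incChar_eq, hitn]
  have hA := wnd_count_slide cs k.toNat ((i-1).toNat) 'A' hrange
  have hC := wnd_count_slide cs k.toNat ((i-1).toNat) 'C' hrange
  have hG := wnd_count_slide cs k.toNat ((i-1).toNat) 'G' hrange
  have hT := wnd_count_slide cs k.toNat ((i-1).toNat) 'T' hrange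
  simp only [count4, hidx]
  refine Prod.ext ?_ (Prod.ext ?_ (Prod.ext ?_ ?_)) <;> simp only [] <;>
    [rw [hA]; rw [hC]; rw [hG]; rw [hT]]

-- the trace of A's current_count values along the loop
def trk (f : (Int × Int × Int × Int) → Int → (Int × Int × Int × Int))
    (cc : Int × Int × Int × Int) : List Int → List (Int × Int × Int × Int)
  | [] => []
  | i :: t => f cc i :: trk f (f cc i) t

-- A's fold = counting the trace, paired with the last state
theorem foldl_modify_trk (f : (Int × Int × Int × Int) → Int → (Int × Int × Int × Int))
    (l : List Int) (d : PySem.Dict (Int × Int × Int × Int) Int) (cc : Int × Int × Int × Int) :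
    l.foldl (fun st i => ((st.1.modify (f st.2 i) 0 (· + 1)), f st.2 i)) (d, cc)
      = ((trk f cc l).foldl (fun d x => d.modify x 0 (· + 1)) d, l.foldl f cc) := by
  induction l generalizing d cc with
  | nil => simp [trk]
  | cons i t ih => simp only [List.foldl_cons, trk, ih]

-- the trace of a step function that realises g is the image of g
theorem trk_pyRange (f : (Int × Int × Int × Int) → Int → (Int × Int × Int × Int))
    (g : Int → (Int × Int × Int × Int)) (a b : Int)
    (h : ∀ i, a ≤ i → i < b → f (g (i - 1)) i = g i) :
    trk f (g (a - 1)) (PySem.List.pyRange a b 1) = (PySem.List.pyRange a b 1).map g := by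
  have key : ∀ (t : Nat) (a : Int), b - a ≤ t →
      (∀ i, a ≤ i → i < b → f (g (i - 1)) i = g i) →
      trk f (g (a - 1)) (PySem.List.pyRange a b 1) = (PySem.List.pyRange a b 1).map g := by
    intro t
    induction t with
    | zero =>
      intro a hle _
      rw [PySem.List.pyRange_one_eq_nil (by omega)]
      rfl
    | succ m ih =>
      intro a hle hstep
      by_cases hab : a < b
      · rw [PySem.List.pyRange_one_cons hab]
        have h1 : f (g (a - 1)) a = g a := hstep a le_rfl hab
        simp only [trk, h1, List.map_cons]
        have hg : g a = g ((a + 1) - 1) := by norm_num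
        rw [hg]
        exact congrArg _ (ih (a + 1) (by omega) (fun i hi1 hi2 => hstep i (by omega) hi2))
      · rw [PySem.List.pyRange_one_eq_nil (by omega)]
        rfl
  exact key (b - a).toNat a (by omega) h

-- the two key sequences coincide
theorem keys_eq (cs : List Char) (k : Int) (hk : 0 ≤ k) :
    count_chars (PySem.List.slice cs none (some k))
        :: trk (updA cs k) (count_chars (PySem.List.slice cs none (some k)))
             (PySem.List.pyRange 1 ((cs.length : Int) - k + 1) 1)
      = (PySem.List.pyRange 0 (max 1 ((cs.length : Int) - k + 1)) 1).map
          (fun i => count4 (PySem.List.slice cs (some i) (some (i + k)))) := by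
  have hhead : count_chars (PySem.List.slice cs none (some k)) = count4 (wnd cs k.toNat 0) := by
    rw [count_chars_eq, PySem.List.slice_to cs hk, wnd, List.drop_zero]
  have hslice : ∀ i : Int, 0 ≤ i →
      count4 (PySem.List.slice cs (some i) (some (i + k))) = count4 (wnd cs k.toNat i.toNat) := by
    intro i hi
    rw [PySem.List.slice_toNat cs hi (by omega), wnd,
      show (i + k).toNat - i.toNat = k.toNat from by omega]
  by_cases hc : (cs.length : Int) - k + 1 ≤ 1
  · rw [PySem.List.pyRange_one_eq_nil hc, show max 1 ((cs.length : Int) - k + 1) = 1 from by omega,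
      show PySem.List.pyRange 0 1 1 = [0] from by decide]
    simp only [trk, List.map_cons, List.map_nil]
    rw [hhead, hslice 0 le_rfl]
    norm_num
  · have hmax : max 1 ((cs.length : Int) - k + 1) = (cs.length : Int) - k + 1 := by omega
    rw [hmax, PySem.List.pyRange_one_cons (show (0:Int) < (cs.length : Int) - k + 1 from by omega),
      hhead]
    simp only [List.map_cons]
    congr 1
    · have := hslice 0 le_rfl
      simp only [zero_add, Int.toNat_zero, PySem.List.slice_zero_start] at this ⊢
      exact this.symm
    · have hg0 : count4 (wnd cs k.toNat 0)
          = (fun i : Int => count4 (wnd cs k.toNat i.toNat)) ((1 : Int) - 1) := by norm_num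
      rw [hg0, trk_pyRange (updA cs k) (fun i : Int => count4 (wnd cs k.toNat i.toNat)) 1
        ((cs.length : Int) - k + 1) (fun i hi1 hi2 => updA_slide cs k i hk hi1 (by omega))]
      refine List.map_congr_left ?_
      intro i hi
      rw [PySem.List.mem_pyRange_one] at hi
      exact (hslice i (by omega)).symm

-- ===== VERDICT (by name: the statement is the Claim_ definition above) =====
theorem find_k_mcs_spec : Claim_equal_find_k_mcs := by
  intro k w _ hk
  unfold Spec_find_k_mcs find_k_mcs find_k_mcs_alt
  simp only
  rw [foldl_modify_trk]
  simp only [PySem.Dict.counter_eq_foldl]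
  have h := keys_eq w.toList k hk
  rw [show ((PySem.Dict.empty).modify (count_chars (PySem.List.slice w.toList none (some k))) 0 (· + 1) : PySem.Dict (Int × Int × Int × Int) Int)
        = [count_chars (PySem.List.slice w.toList none (some k))].foldl (fun d x => d.modify x 0 (· + 1)) PySem.Dict.empty from rfl]
  rw [← List.foldl_append]
  simp only [PySem.List.len_eq, List.singleton_append]
  rw [h]
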